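-- pv_equiv track=rewrite | github.com/YuriyM2024/Proekt-1077 | pack_characters.py | pack_characters
-- ===== SOURCE A (Python) =====
-- def pack_characters(input_string):
--     # Разбиваем строку на символы
--     characters = input_string.split()
--
--     # Список для хранения подсписков
--     result = []
--
--     # Переменная для текущего подсписка
--     current_group = []
--
--     for char in characters:
--         if not current_group or current_group[-1] == char:
--             # Если текущая группа пуста или последний элемент равен текущему символу
--             current_group.append(char)
--         else:
--             # Если символ отличается, добавляем текущую группу в результат
--             result.append(current_group)
--             # Начинаем новую группу
--             current_group = [char]
--
--     # Добавляем последнюю группу в результат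
--     if current_group:
--         result.append(current_group)
--
--     return result
-- ===== SOURCE B (Python) =====
-- def pack_characters(input_string):
--     tokens = input_string.split()
--     result = []
--     i = 0
--     n = len(tokens)
--     while i < n:
--         # extend j to the end of the run of tokens equal to tokens[i]
--         j = i + 1
--         while j < n and tokens[j] == tokens[i]:
--             j += 1
--         result.append(tokens[i:j])
--         i = j
--     return result
-- ===== Notes on version B (the rewrite author's own statement) =====
-- stated objective: alternative
-- what changed: Replaces A's single accumulator fold (carrying a growing current_group and flushing it on change and after the loop) by run extraction: an outer loop that, at each run start, scans the whole run at once and slices it out, with no carried partial group and no post-loop flush.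
import Mathlib
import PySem

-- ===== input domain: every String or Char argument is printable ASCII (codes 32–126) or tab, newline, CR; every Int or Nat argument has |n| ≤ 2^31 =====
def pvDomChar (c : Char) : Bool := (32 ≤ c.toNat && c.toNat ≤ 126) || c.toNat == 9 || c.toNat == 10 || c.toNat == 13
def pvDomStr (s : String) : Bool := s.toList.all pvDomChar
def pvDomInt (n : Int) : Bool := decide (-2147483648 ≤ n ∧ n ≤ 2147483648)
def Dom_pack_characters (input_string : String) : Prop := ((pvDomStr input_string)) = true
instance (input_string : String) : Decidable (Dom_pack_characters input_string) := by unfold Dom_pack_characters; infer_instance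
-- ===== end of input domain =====

-- B replaces A's accumulator fold (carry current_group, flush on change and after the loop)
-- by run extraction: at each run start the whole run is sliced out at once; return values agree.

-- ===== PORT A =====
-- one step of A's for-loop over `characters`, state = (result, current_group)
def pvAStep (st : List (List String) × List String) (c : String) :
    List (List String) × List String :=
  if st.2.isEmpty || st.2.getLast? == some c then (st.1, st.2 ++ [c])
  else (st.1 ++ [st.2], [c])

def pack_characters (input_string : String) : List (List String) :=
  let characters := PySem.Str.split₀ input_string
  let st := characters.foldl pvAStep ([], [])
  if !st.2.isEmpty then st.1 ++ [st.2] else st.1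

-- ===== PORT B =====
-- Source B's inner while-loop scans the run of tokens equal to tokens[i] and slices it out
-- (= takeWhile/dropWhile on the remaining tokens); the outer loop restarts at the run's end.
def pvRuns (tokens : List String) : List (List String) :=
  match tokens with
  | [] => []
  | x :: xs => (x :: xs.takeWhile (· == x)) :: pvRuns (xs.dropWhile (· == x))
termination_by tokens.length
decreasing_by
  simpa using Nat.lt_succ_of_le (List.length_dropWhile_le (· == x) xs)

def pack_characters_alt (input_string : String) : List (List String) :=
  pvRuns (PySem.Str.split₀ input_string)

-- ===== PRECONDITION & SPEC =====
def Spec_pack_characters (input_string : String) (out : List (List String)) : Prop := out = pack_characters_alt input_string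
instance (input_string : String) (out : List (List String)) : Decidable (Spec_pack_characters input_string out) := by unfold Spec_pack_characters; infer_instance

-- ===== CLAIM (what is proved, stated in full; the proofs are below) =====
def Claim_equal_pack_characters : Prop := ∀ (input_string : String), Dom_pack_characters input_string → Spec_pack_characters input_string (pack_characters input_string)

-- ===== LEMMAS AND PROOFS =====

def pvFinish (st : List (List String) × List String) : List (List String) :=
  if !st.2.isEmpty then st.1 ++ [st.2] else st.1

theorem pvRuns_replicate_append (k : Nat) (x : String) (l : List String) :
    pvRuns (List.replicate (k+1) x ++ l) =
      (List.replicate (k+1) x ++ l.takeWhile (· == x)) :: pvRuns (l.dropWhile (· == x)) := by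
  induction k with
  | zero => simp [pvRuns, List.replicate]
  | succ n ih =>
    rw [List.replicate_succ, List.cons_append, pvRuns]
    have ht : List.takeWhile (· == x) (List.replicate (n+1) x ++ l)
        = List.replicate (n+1) x ++ l.takeWhile (· == x) := by
      induction n with
      | zero => simp [List.replicate]
      | succ m _ => rw [List.replicate_succ, List.cons_append, List.takeWhile_cons]; simp
    have hd : List.dropWhile (· == x) (List.replicate (n+1) x ++ l)
        = l.dropWhile (· == x) := by
      induction n with
      | zero => simp [List.replicate]
      | succ m _ => rw [List.replicate_succ, List.cons_append, List.dropWhile_cons]; simp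
    rw [ht, hd]
    simp [List.replicate_succ]

theorem pvLoop (l : List String) (res : List (List String)) (x : String) (k : Nat) :
    pvFinish (l.foldl pvAStep (res, List.replicate (k+1) x)) =
      res ++ pvRuns (List.replicate (k+1) x ++ l) := by
  induction l generalizing res x k with
  | nil =>
    rw [List.foldl_nil, pvRuns_replicate_append k x []]
    simp [pvFinish, pvRuns]
  | cons c l' ih =>
    rw [List.foldl_cons]
    by_cases hcx : x = c
    · subst hcx
      have hstep : pvAStep (res, List.replicate (k+1) x) x
          = (res, List.replicate (k+2) x) := by
        simp [pvAStep, List.getLast?_replicate, List.replicate_succ' (n := k+1)]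
      rw [hstep, ih]
      have : List.replicate (k+2) x ++ l' = List.replicate (k+1) x ++ x :: l' := by
        rw [List.replicate_succ' (n := k+1)]; simp
      rw [this]
    · have hstep : pvAStep (res, List.replicate (k+1) x) c
          = (res ++ [List.replicate (k+1) x], List.replicate 1 c) := by
        simp only [pvAStep, List.getLast?_replicate]
        simp [List.replicate]
        exact hcx
      have ht : List.takeWhile (· == x) (c :: l') = [] := by
        simp [Ne.symm hcx]
      have hd : List.dropWhile (· == x) (c :: l') = c :: l' := by
        simp [Ne.symm hcx]
      rw [hstep, ih,
        show List.replicate 1 c ++ l' = c :: l' from rfl,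
        pvRuns_replicate_append k x (c :: l'), ht, hd]
      simp

theorem pvMain (tokens : List String) :
    pvFinish (tokens.foldl pvAStep ([], [])) = pvRuns tokens := by
  cases tokens with
  | nil => simp [pvFinish, pvRuns]
  | cons t ts =>
    rw [List.foldl_cons]
    have hstep : pvAStep ([], []) t = ([], List.replicate 1 t) := by
      simp [pvAStep, List.replicate]
    rw [hstep, pvLoop]
    simp [List.replicate]

-- ===== VERDICT (by name: the statement is the Claim_ definition above) =====
theorem pack_characters_spec : Claim_equal_pack_characters := by
  intro s _
  show pack_characters s = pack_characters_alt s
  unfold pack_characters pack_characters_alt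
  exact pvMain (PySem.Str.split₀ s)
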